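-- pv_equiv track=rewrite | github.com/NITHISHKUMAR0283/Email_Phising | app/phishing_engine.py | parse_email_headers
-- ===== SOURCE A (Python) =====
-- from typing import List, Dict, Any, Optional, Tuple
--
-- def parse_email_headers(raw_headers: str) -> Dict[str, str]:
-- 	"""
-- 	Parse raw email headers (multi-line format) into a dictionary.
-- 	Handles folded headers (wrapped lines starting with space/tab).
--
-- 	Input:
-- 	```
-- 	From: Quincy Larson <quincy@freecodecamp.org>
-- 	Return-Path: <010f019d2d74f841@us-east-2.amazonses.com>
-- 	Received-SPF: pass (google.com: ...)
-- 	Authentication-Results: mx.google.com;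
-- 	       dkim=pass header.i=@freecodecamp.org;
-- 	       dmarc=pass header.from=freecodecamp.org
-- 	```
--
-- 	Output:
-- 	```
-- 	{
-- 		"From": "Quincy Larson <quincy@freecodecamp.org>",
-- 		"Return-Path": "<010f019d2d74f841@us-east-2.amazonses.com>",
-- 		"Received-SPF": "pass (google.com: ...)",
-- 		"Authentication-Results": "mx.google.com; dkim=pass header.i=@freecodecamp.org; dmarc=pass header.from=freecodecamp.org"
-- 	}
-- 	```
-- 	"""
-- 	headers_dict = {}
-- 	current_key = None
-- 	current_value = ""
--
-- 	for line in raw_headers.split('\n'):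
-- 		# Check if this is a continuation line (starts with space or tab)
-- 		if line and line[0] in (' ', '\t'):
-- 			# Append to current header value (continuation)
-- 			current_value += " " + line.strip()
-- 		else:
-- 			# Save previous header if exists
-- 			if current_key:
-- 				headers_dict[current_key] = current_value.strip()
--
-- 			# Parse new header
-- 			if ':' in line:
-- 				current_key, current_value = line.split(':', 1)
-- 				current_key = current_key.strip()
-- 				current_value = current_value.strip()
-- 			else:
-- 				current_key = None
-- 				current_value = ""
--
-- 	# Save last header
-- 	if current_key:
-- 		headers_dict[current_key] = current_value.strip()
--
-- 	return headers_dict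
-- ===== SOURCE B (Python) =====
-- def parse_email_headers(raw_headers: str) -> dict:
--     """Two-pass parse: first group physical lines into logical headers,
--     then emit each logical header into the dict."""
--     lines = raw_headers.split('\n')
--     n = len(lines)
--     # Pass 1: group into (first physical line, [stripped continuation fragments]).
--     groups = []
--     i = 0
--     while i < n:
--         line = lines[i]
--         i += 1
--         if line and line[0] in (' ', '\t'):
--             # continuation before any header line: never stored
--             continue
--         conts = []
--         while i < n and lines[i] and lines[i][0] in (' ', '\t'):
--             conts.append(lines[i].strip())
--             i += 1
--         groups.append((line, conts))
--     # Pass 2: emit each logical header.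
--     result = {}
--     for first, conts in groups:
--         if ':' not in first:
--             continue
--         key, val = first.split(':', 1)
--         key = key.strip()
--         if not key:
--             continue  # a line like ": v" has no field name
--         result[key] = ' '.join([val.strip()] + conts).strip()
--     return result
-- ===== Notes on version B (the rewrite author's own statement) =====
-- stated objective: alternative
-- what changed: Replaces A's single fold with mutable (dict, current_key, current_value) state by a two-pass decomposition: pass 1 groups physical lines into logical headers (first line + stripped continuation fragments), pass 2 emits each logical header by splitting once on ':' and joining the fragments with ' '.join.
import Mathlib
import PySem

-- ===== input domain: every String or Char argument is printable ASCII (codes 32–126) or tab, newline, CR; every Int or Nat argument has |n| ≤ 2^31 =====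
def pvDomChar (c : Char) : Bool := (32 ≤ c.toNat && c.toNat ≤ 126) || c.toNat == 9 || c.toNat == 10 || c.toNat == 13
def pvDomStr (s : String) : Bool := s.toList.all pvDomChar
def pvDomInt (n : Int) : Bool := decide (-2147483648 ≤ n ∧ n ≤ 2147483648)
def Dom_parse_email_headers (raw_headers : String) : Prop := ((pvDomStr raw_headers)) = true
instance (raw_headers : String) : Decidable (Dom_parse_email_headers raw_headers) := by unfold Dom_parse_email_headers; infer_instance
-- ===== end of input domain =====

-- B re-decomposes A's one-pass mutable-state fold into two passes (group physical lines into
-- logical headers, then emit each); same return value, same O(n) cost ("alternative").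

-- Shared transliterations of Python fragments both sources contain verbatim:
-- `line and line[0] in (' ', '\t')`
def pvIsCont (l : List Char) : Bool :=
  match l with
  | [] => false
  | c :: _ => c == ' ' || c == '\t'

-- `':' in line` followed by `line.split(':', 1)` (exactly two parts when ':' occurs)
def pvSplitColon (l : List Char) : Option (List Char × List Char) :=
  if PySem.Chars.isIn [':'] l then
    match PySem.Chars.splitOnMax l [':'] 1 with
    | [k, v] => some (k, v)
    | _ => none   -- unreachable: split(sep, 1) with sep present yields two parts
  else none

-- ===== PORT A =====
-- state = (headers_dict, current_key, current_value); current_key = none ↔ Python None,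
-- and `if current_key:` is the truthiness test (None and "" are falsy)
def pvSaveA (d : PySem.Dict String String) (ck : Option (List Char)) (cv : List Char) :
    PySem.Dict String String :=
  match ck with
  | some k => if k = [] then d else d.insert (String.ofList k) (String.ofList (PySem.Chars.strip cv))
  | none => d

def pvStepA (st : PySem.Dict String String × Option (List Char) × List Char) (line : List Char) :
    PySem.Dict String String × Option (List Char) × List Char :=
  if pvIsCont line then
    (st.1, st.2.1, st.2.2 ++ (' ' :: PySem.Chars.strip line))   -- current_value += " " + line.strip()
  else
    let d := pvSaveA st.1 st.2.1 st.2.2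
    match pvSplitColon line with
    | some (k, v) => (d, some (PySem.Chars.strip k), PySem.Chars.strip v)
    | none => (d, none, [])

def parse_email_headers (raw_headers : String) : List (String × String) :=
  let st := (PySem.Chars.splitOn raw_headers.toList ['\n']).foldl pvStepA
              (PySem.Dict.empty, none, [])
  (pvSaveA st.1 st.2.1 st.2.2).items

-- ===== PORT B =====
-- pass 1, inner `while`: consume the continuation lines following a header line
def pvTakeConts : List (List Char) → List (List Char) × List (List Char)
  | [] => ([], [])
  | l :: rest =>
    if pvIsCont l then
      let p := pvTakeConts rest
      (PySem.Chars.strip l :: p.1, p.2)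
    else ([], l :: rest)

theorem pvTakeConts_snd_length_le (ls : List (List Char)) :
    (pvTakeConts ls).2.length ≤ ls.length := by
  induction ls with
  | nil => simp [pvTakeConts]
  | cons l rest ih =>
    simp only [pvTakeConts]
    split
    · exact Nat.le_succ_of_le ih
    · exact Nat.le_refl _

-- pass 1, outer `while`: group lines into (first physical line, stripped continuations)
def pvGroups : List (List Char) → List (List Char × List (List Char))
  | [] => []
  | l :: rest =>
    if pvIsCont l then pvGroups rest   -- continuation before any header: never stored
    else
      let p := pvTakeConts rest
      (l, p.1) :: pvGroups p.2
termination_by ls => ls.length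
decreasing_by
  all_goals (have := pvTakeConts_snd_length_le rest; simp; try omega)

-- pass 2: emit one logical header into the dict
def pvEmitB (d : PySem.Dict String String) (gs : List (List Char × List (List Char))) :
    PySem.Dict String String :=
  gs.foldl (fun d g =>
    match pvSplitColon g.1 with
    | none => d
    | some (k, v) =>
      let k := PySem.Chars.strip k
      if k = [] then d   -- a line like ": v" has no field name
      else d.insert (String.ofList k)
             (String.ofList (PySem.Chars.strip
               (PySem.Chars.join [' '] (PySem.Chars.strip v :: g.2))))) d

def parse_email_headers_alt (raw_headers : String) : List (String × String) :=
  (pvEmitB PySem.Dict.empty (pvGroups (PySem.Chars.splitOn raw_headers.toList ['\n']))).items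

-- ===== PRECONDITION & SPEC =====
def Spec_parse_email_headers (raw_headers : String) (out : List (String × String)) : Prop := out = parse_email_headers_alt raw_headers
instance (raw_headers : String) (out : List (String × String)) : Decidable (Spec_parse_email_headers raw_headers out) := by unfold Spec_parse_email_headers; infer_instance

-- ===== CLAIM (what is proved, stated in full; the proofs are below) =====
def Claim_equal_parse_email_headers : Prop := ∀ (raw_headers : String), Dom_parse_email_headers raw_headers → Spec_parse_email_headers raw_headers (parse_email_headers raw_headers)

-- ===== LEMMAS AND PROOFS =====

-- A's loop followed by the final save, as a function of the entry state
def pvRunA (d : PySem.Dict String String) (ck : Option (List Char)) (cv : List Char)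
    (ls : List (List Char)) : PySem.Dict String String :=
  let st := ls.foldl pvStepA (d, ck, cv)
  pvSaveA st.1 st.2.1 st.2.2

-- A's `current_value += " " + c` accumulation over the continuation fragments
def pvAcc (v : List Char) (cs : List (List Char)) : List Char :=
  cs.foldl (fun v c => v ++ (' ' :: c)) v

theorem pvJoin_cons_append (v c : List Char) (cs : List (List Char)) :
    PySem.Chars.join [' '] ((v ++ (' ' :: c)) :: cs)
      = v ++ (' ' :: PySem.Chars.join [' '] (c :: cs)) := by
  cases cs with
  | nil => simp [PySem.Chars.join_singleton]
  | cons c' cs' => simp [PySem.Chars.join_cons_cons]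

theorem pvAcc_eq_join (cs : List (List Char)) (v : List Char) :
    pvAcc v cs = PySem.Chars.join [' '] (v :: cs) := by
  induction cs generalizing v with
  | nil => simp [pvAcc, PySem.Chars.join_singleton]
  | cons c cs ih =>
    have : pvAcc v (c :: cs) = pvAcc (v ++ (' ' :: c)) cs := by
      simp [pvAcc, List.foldl_cons]
    rw [this, ih, pvJoin_cons_append, PySem.Chars.join_cons_cons]
    simp

theorem pvGroups_takeConts (ls : List (List Char)) :
    pvGroups ls = pvGroups (pvTakeConts ls).2 := by
  induction ls with
  | nil => simp [pvTakeConts]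
  | cons l rest ih =>
    by_cases h : pvIsCont l = true
    · rw [show pvGroups (l :: rest) = pvGroups rest from by rw [pvGroups]; simp [h], ih]
      rw [show pvTakeConts (l :: rest) = (PySem.Chars.strip l :: (pvTakeConts rest).1, (pvTakeConts rest).2) from by rw [pvTakeConts]; simp [h]]
    · rw [show pvTakeConts (l :: rest) = ([], l :: rest) from by rw [pvTakeConts]; simp [h]]

-- While a header is open (current_key = some k), A consumes exactly the continuation block,
-- saves, and proceeds on the remainder with key None.
theorem pvRunA_some (ls : List (List Char)) (d : PySem.Dict String String)
    (k v : List Char) :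
    pvRunA d (some k) v ls
      = pvRunA (pvSaveA d (some k) (pvAcc v (pvTakeConts ls).1)) none [] (pvTakeConts ls).2 := by
  induction ls generalizing v with
  | nil => simp [pvRunA, pvTakeConts, pvAcc, pvSaveA]
  | cons l rest ih =>
    by_cases h : pvIsCont l = true
    · rw [show pvTakeConts (l :: rest) = (PySem.Chars.strip l :: (pvTakeConts rest).1, (pvTakeConts rest).2) from by rw [pvTakeConts]; simp [h]]
      have hstep : pvRunA d (some k) v (l :: rest)
          = pvRunA d (some k) (v ++ (' ' :: PySem.Chars.strip l)) rest := by
        simp [pvRunA, List.foldl_cons, pvStepA, h]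
      rw [hstep, ih]
      simp [pvAcc, List.foldl_cons]
    · rw [show pvTakeConts (l :: rest) = ([], l :: rest) from by rw [pvTakeConts]; simp [h]]
      show pvRunA d (some k) v (l :: rest)
          = pvRunA (pvSaveA d (some k) (pvAcc v [])) none [] (l :: rest)
      simp only [pvRunA, List.foldl_cons, pvAcc, List.foldl_nil]
      have hst : pvStepA (d, some k, v) l
          = pvStepA (pvSaveA d (some k) v, none, []) l := by
        cases hc : pvSplitColon l <;> simp [pvStepA, h, hc, pvSaveA]
      rw [hst]

-- Main invariant: A's run from key None equals B's emit over B's grouping.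
theorem pvRunA_eq_emit (n : Nat) (ls : List (List Char)) (h : ls.length ≤ n)
    (d : PySem.Dict String String) (v : List Char) :
    pvRunA d none v ls = pvEmitB d (pvGroups ls) := by
  induction n generalizing ls d v with
  | zero =>
    have : ls = [] := List.length_eq_zero_iff.mp (Nat.le_zero.mp h)
    subst this
    simp [pvRunA, pvGroups, pvEmitB, pvSaveA]
  | succ n ih =>
    cases ls with
    | nil => simp [pvRunA, pvGroups, pvEmitB, pvSaveA]
    | cons l rest =>
      have hrest : rest.length ≤ n := by simpa using h
      by_cases hc : pvIsCont l = true
      · have hstep : pvRunA d none v (l :: rest)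
            = pvRunA d none (v ++ (' ' :: PySem.Chars.strip l)) rest := by
          simp [pvRunA, List.foldl_cons, pvStepA, hc]
        rw [hstep, ih rest hrest, show pvGroups (l :: rest) = pvGroups rest from by rw [pvGroups]; simp [hc]]
      · have htc := pvTakeConts_snd_length_le rest
        have hgr : pvGroups (l :: rest)
            = (l, (pvTakeConts rest).1) :: pvGroups (pvTakeConts rest).2 := by
          rw [pvGroups]; simp [hc]
        cases hsp : pvSplitColon l with
        | none =>
          have hstep : pvRunA d none v (l :: rest) = pvRunA d none [] rest := by
            simp [pvRunA, List.foldl_cons, pvStepA, hc, hsp, pvSaveA]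
          rw [hstep, ih rest hrest, hgr]
          rw [pvGroups_takeConts rest]
          simp [pvEmitB, List.foldl_cons, hsp]
        | some kv =>
          have hstep : pvRunA d none v (l :: rest)
              = pvRunA d (some (PySem.Chars.strip kv.1)) (PySem.Chars.strip kv.2) rest := by
            simp [pvRunA, List.foldl_cons, pvStepA, hc, hsp, pvSaveA]
          rw [hstep, pvRunA_some, ih _ (Nat.le_trans htc hrest), hgr]
          by_cases hk : PySem.Chars.strip kv.1 = []
          · simp [pvEmitB, List.foldl_cons, hsp, hk, pvSaveA]
          · simp [pvEmitB, List.foldl_cons, hsp, hk, pvSaveA, pvAcc_eq_join]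

-- ===== VERDICT (by name: the statement is the Claim_ definition above) =====
theorem parse_email_headers_spec : Claim_equal_parse_email_headers := by
  intro raw _
  show parse_email_headers raw = parse_email_headers_alt raw
  show (pvRunA PySem.Dict.empty none [] (PySem.Chars.splitOn raw.toList ['\n'])).items
      = (pvEmitB PySem.Dict.empty (pvGroups (PySem.Chars.splitOn raw.toList ['\n']))).items
  exact congrArg PySem.Dict.items (pvRunA_eq_emit _ _ (Nat.le_refl _) _ _)
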